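-- pv_equiv track=rewrite | github.com/engks4619/CodingTestPractice | programmers/Level1/직업군 추천하기.py | solution
-- ===== SOURCE A (Python) =====
-- def solution(table, languages, preference):
--     result = []
--     for i in table:
--         score = 0
--         i = i.split(" ")
--         for idx,lan in enumerate(languages):
--             if lan in i:
--                 score += preference[idx]*(len(i)-i.index(lan))
--         result.append((i[0],score))
--     result = sorted(result, key = lambda x : (-x[1],x[0]))
--     return result[0][0]
-- ===== SOURCE B (Python) =====
-- def solution(table, languages, preference):
--     best = None  # (name, score) of the best row so far
--     for row in table:
--         words = row.split(" ")
--         score = 0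
--         for idx, lan in enumerate(languages):
--             if lan in words:
--                 score += preference[idx] * (len(words) - words.index(lan))
--         name = words[0]
--         if best is None or score > best[1] or (score == best[1] and name < best[0]):
--             best = (name, score)
--     return best[0]
-- ===== Notes on version B (the rewrite author's own statement) =====
-- stated objective: simpler
-- what changed: Replaces building a (name,score) list, sorting it by (-score,name) and taking the head with a single-pass running-best scan that updates the candidate on strictly better score or equal score with lexicographically smaller name.
import Mathlib
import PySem

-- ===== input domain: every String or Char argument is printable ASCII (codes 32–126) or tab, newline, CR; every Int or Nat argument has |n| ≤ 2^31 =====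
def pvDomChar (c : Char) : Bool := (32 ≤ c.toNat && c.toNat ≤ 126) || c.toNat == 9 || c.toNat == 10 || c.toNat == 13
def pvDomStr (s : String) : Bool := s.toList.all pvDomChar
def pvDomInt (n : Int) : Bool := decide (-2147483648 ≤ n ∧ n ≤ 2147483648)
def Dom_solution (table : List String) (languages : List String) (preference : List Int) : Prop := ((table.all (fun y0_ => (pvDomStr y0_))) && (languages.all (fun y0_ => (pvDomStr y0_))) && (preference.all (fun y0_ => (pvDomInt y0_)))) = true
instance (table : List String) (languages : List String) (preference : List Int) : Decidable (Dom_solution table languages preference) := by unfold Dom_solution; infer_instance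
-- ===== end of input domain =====

-- B replaces A's build-list/sort-by-(-score,name)/take-head by a single-pass running-best scan.
-- The per-row scoring loop is identical in both Pythons, so both ports share the helpers below.

-- shared helpers (the identical per-row code of both Pythons)
def pySplitSp (s : String) : List String := (PySem.Str.split? s " ").getD []

def rowScore (languages : List String) (preference : List Int) (words : List String) : Int :=
  (PySem.List.enumerate languages 0).foldl
    (fun score p =>
      if words.contains p.2 then
        score + PySem.List.pyGetD preference p.1 0 *
          ((words.length : Int) - (((PySem.List.index? words p.2).getD 0 : Nat) : Int))
      else score) 0

-- ===== PORT A =====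
def solution (table : List String) (languages : List String) (preference : List Int) : String :=
  let result : List (String × Int) :=
    table.foldl (fun acc i =>
      let words := pySplitSp i
      let score := rowScore languages preference words
      acc ++ [((PySem.List.pyGet? words 0).getD "", score)]) []
  let result := PySem.List.sorted2 result (fun x => -x.2) (fun x => x.1)
  ((PySem.List.pyGet? result 0).map (fun p => p.1)).getD ""

-- ===== PORT B =====
-- `best is None or score > best[1] or (score == best[1] and name < best[0])` is ported through
-- Option.elim with Python's short-circuit or/and as Bool `||`/`&&`; the final `best[0]` is
-- map-fst (Pre_ guarantees best is not None there).
def solution_alt (table : List String) (languages : List String) (preference : List Int) : String :=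
  let best : Option (String × Int) :=
    table.foldl (fun best row =>
      let words := pySplitSp row
      let score := rowScore languages preference words
      let name := (PySem.List.pyGet? words 0).getD ""
      if best.elim true (fun b =>
            decide (score > b.2) || (decide (score = b.2) && decide (name < b.1)))
      then some (name, score) else best)
      none
  (best.map (fun p => p.1)).getD ""

-- ===== PRECONDITION & SPEC =====
-- Pre_ excludes exactly the inputs on which Python A raises: an empty table (result[0] is an
-- IndexError) and tables where some language whose index is past the end of preference occurs in
-- some row (preference[idx] is an IndexError).
def Pre_solution (table : List String) (languages : List String) (preference : List Int) : Prop :=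
  table ≠ [] ∧
  ((PySem.List.enumerate languages 0).all (fun p =>
      decide (p.1 < (preference.length : Int)) ||
      table.all (fun row => !((pySplitSp row).contains p.2)))) = true
instance (table : List String) (languages : List String) (preference : List Int) : Decidable (Pre_solution table languages preference) := by unfold Pre_solution; infer_instance

def pvWitness_solution : List String × List String × List Int :=
  (["python 5 java", "java 3"], ["python", "java"], [4, 2])

def Spec_solution (table : List String) (languages : List String) (preference : List Int) (out : String) : Prop := out = solution_alt table languages preference
instance (table : List String) (languages : List String) (preference : List Int) (out : String) : Decidable (Spec_solution table languages preference out) := by unfold Spec_solution; infer_instance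

-- ===== CLAIM (what is proved, stated in full; the proofs are below) =====
def Claim_equal_solution : Prop := ∀ (table : List String) (languages : List String) (preference : List Int), Dom_solution table languages preference → Pre_solution table languages preference → Spec_solution table languages preference (solution table languages preference)

-- ===== LEMMAS AND PROOFS =====

-- A's accumulator loop is a map
theorem foldl_append_map {α β : Type} (f : α → β) (l : List α) (acc : List β) :
    l.foldl (fun acc x => acc ++ [f x]) acc = acc ++ l.map f := by
  induction l generalizing acc with
  | nil => simp
  | cons x xs ih => simp [List.foldl_cons, ih]

theorem head?_insertBy {α : Type} (before : α → α → Bool) (x : α) (l : List α) :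
    (PySem.List.insertBy before x l).head? =
      some (l.head?.elim x (fun y => if before x y then x else y)) := by
  cases l with
  | nil => rfl
  | cons y ys =>
    simp only [PySem.List.insertBy]
    split <;> simp [*]

-- head of the insertion-sort fold is the running (first-)minimum under `before`
theorem head?_foldl_insertBy {α : Type} (before : α → α → Bool) (xs : List α) (acc : List α) :
    (xs.foldl (fun acc x => PySem.List.insertBy before x acc) acc).head?
      = xs.foldl
          (fun o x => o.elim (some x) (fun m => if before x m then some x else some m))
          acc.head? := by
  induction xs generalizing acc with
  | nil => rfl
  | cons x xs ih =>
    rw [List.foldl_cons, List.foldl_cons, ih, head?_insertBy]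
    cases acc with
    | nil => rfl
    | cons y ys =>
      simp only [List.head?_cons, Option.elim_some]
      split <;> rfl

-- the sorted2 lex-less test equals B's explicit update condition
theorem before_eq (s bs : Int) (n bn : String) :
    (decide ((-s : Int) < -bs) || (!decide ((-bs : Int) < -s) && decide (n < bn)))
      = (decide (s > bs) || (decide (s = bs) && decide (n < bn))) := by
  by_cases hn : n < bn <;> by_cases h1 : bs < s <;> by_cases h2 : s < bs <;>
    simp [hn, h1, h2, show ((-s : Int) < -bs) ↔ bs < s from by omega,
      show ((-bs : Int) < -s) ↔ s < bs from by omega, gt_iff_lt] <;> omega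

theorem solution_eq (table languages : List String) (preference : List Int) :
    solution table languages preference = solution_alt table languages preference := by
  unfold solution solution_alt
  set f : String → String × Int := fun row =>
    ((PySem.List.pyGet? (pySplitSp row) 0).getD "",
      rowScore languages preference (pySplitSp row)) with hf
  have hA : table.foldl (fun acc i =>
      acc ++ [((PySem.List.pyGet? (pySplitSp i) 0).getD "",
               rowScore languages preference (pySplitSp i))]) []
      = table.map f := by
    simpa using foldl_append_map f table []
  simp only [hA]
  set before : (String × Int) → (String × Int) → Bool := fun a b =>
    decide ((-a.2 : Int) < -b.2) || (!decide ((-b.2 : Int) < -a.2) && decide (a.1 < b.1)) with hb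
  have hsorted : PySem.List.sorted2 (table.map f) (fun x => -x.2) (fun x => x.1)
      = (table.map f).foldl (fun acc x => PySem.List.insertBy before x acc) [] := rfl
  rw [hsorted]
  have hhead := head?_foldl_insertBy before (table.map f) []
  simp only [List.head?_nil] at hhead
  have hget : ∀ (l : List (String × Int)), PySem.List.pyGet? l 0 = l.head? := by
    intro l
    have := PySem.List.pyGet?_natCast l 0
    simpa [List.head?_eq_getElem?] using this
  rw [hget, hhead]
  -- B's fold is the same running minimum, with the condition rewritten
  have hBfold : table.foldl (fun best row =>
        if best.elim true (fun b =>
              decide (rowScore languages preference (pySplitSp row) > b.2) ||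
              (decide (rowScore languages preference (pySplitSp row) = b.2) &&
               decide ((PySem.List.pyGet? (pySplitSp row) 0).getD "" < b.1)))
        then some ((PySem.List.pyGet? (pySplitSp row) 0).getD "",
                   rowScore languages preference (pySplitSp row))
        else best) none
      = (table.map f).foldl
          (fun o x => o.elim (some x) (fun m => if before x m then some x else some m)) none := by
    rw [List.foldl_map]
    have hfun : (fun (best : Option (String × Int)) (row : String) =>
        if best.elim true (fun b =>
              decide (rowScore languages preference (pySplitSp row) > b.2) ||
              (decide (rowScore languages preference (pySplitSp row) = b.2) &&
               decide ((PySem.List.pyGet? (pySplitSp row) 0).getD "" < b.1)))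
        then some ((PySem.List.pyGet? (pySplitSp row) 0).getD "",
                   rowScore languages preference (pySplitSp row))
        else best)
        = (fun (o : Option (String × Int)) (row : String) =>
            o.elim (some (f row)) (fun m => if before (f row) m then some (f row) else some m)) := by
      funext o row
      cases o with
      | none => rfl
      | some b =>
        obtain ⟨bn, bs⟩ := b
        show (if (decide ((f row).2 > bs) || (decide ((f row).2 = bs) && decide ((f row).1 < bn)))
              then some (f row) else some (bn, bs))
           = (if before (f row) (bn, bs) then some (f row) else some (bn, bs))
        simp only [hb]
        rw [before_eq (f row).2 bs (f row).1 bn]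
    rw [hfun]
  rw [hBfold]

-- ===== VERDICT (by name: the statement is the Claim_ definition above) =====
theorem solution_spec : Claim_equal_solution := by
  intro table languages preference _ _
  unfold Spec_solution
  exact solution_eq table languages preference
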